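-- pv_equiv track=rewrite | github.com/jeese888/textcnn | aio.py | words2ids
-- ===== SOURCE A (Python) =====
-- def words2ids(words_list, vocab_dict, max_docment_length):
--     ids = []
--     for item in words_list:
--         if item in vocab_dict and len(ids) < max_docment_length:
--             ids.append(vocab_dict[item])
--     if len(ids) < max_docment_length:
--         for i in range(max_docment_length - len(ids)):
--             ids.append(vocab_dict['<UNK>'])
--     return ids
-- ===== SOURCE B (Python) =====
-- def words2ids(words_list, vocab_dict, max_docment_length):
--     out = []
--     words = iter(words_list)
--     while len(out) < max_docment_length:
--         for w in words:
--             if w in vocab_dict: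
--                 out.append(vocab_dict[w])
--                 break
--         else:
--             out.append(vocab_dict['<UNK>'])
--     return out
-- ===== Notes on version B (the rewrite author's own statement) =====
-- stated objective: alternative
-- what changed: Replaces A's input-driven capped filter loop plus separate index-counted padding loop by one output-driven while loop that produces exactly the required number of items, pulling in-vocab ids from a shared iterator (for-else) and emitting the pad token once it is exhausted; Pre_ excludes inputs where both programs raise KeyError ('<UNK>' missing from the dict while padding is needed).
import Mathlib
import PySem

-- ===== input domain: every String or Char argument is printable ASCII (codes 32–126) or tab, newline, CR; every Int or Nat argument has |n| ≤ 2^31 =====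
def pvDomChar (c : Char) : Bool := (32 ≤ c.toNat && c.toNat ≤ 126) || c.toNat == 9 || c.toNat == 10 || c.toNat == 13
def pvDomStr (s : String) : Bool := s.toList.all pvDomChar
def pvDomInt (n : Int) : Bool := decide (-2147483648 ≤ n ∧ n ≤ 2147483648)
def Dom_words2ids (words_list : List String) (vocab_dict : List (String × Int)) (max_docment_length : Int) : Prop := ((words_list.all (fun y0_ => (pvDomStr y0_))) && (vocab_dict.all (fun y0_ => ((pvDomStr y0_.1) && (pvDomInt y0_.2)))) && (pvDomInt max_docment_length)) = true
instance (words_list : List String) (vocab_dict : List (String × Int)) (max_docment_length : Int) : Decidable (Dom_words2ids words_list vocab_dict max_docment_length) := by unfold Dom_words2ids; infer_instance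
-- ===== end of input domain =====

-- B is an output-driven loop producing exactly the required number of items from a
-- word iterator, instead of A's input-driven capped loop plus a padding loop; objective: alternative.

-- shared dict primitives: membership test and first-match lookup (Python dict access)
def pvHas (vocab_dict : List (String × Int)) (k : String) : Bool := (vocab_dict.lookup k).isSome
def pvGet (vocab_dict : List (String × Int)) (k : String) : Int := (vocab_dict.lookup k).getD 0

-- ===== PORT A =====
def words2ids (words_list : List String) (vocab_dict : List (String × Int)) (max_docment_length : Int) : List Int :=
  let ids := words_list.foldl
    (fun ids item =>
      if pvHas vocab_dict item && decide ((ids.length : Int) < max_docment_length) then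
        ids ++ [pvGet vocab_dict item]
      else ids) []
  if (ids.length : Int) < max_docment_length then
    (PySem.List.pyRange 0 (max_docment_length - (ids.length : Int)) 1).foldl
      (fun acc _ => acc ++ [pvGet vocab_dict "<UNK>"]) ids
  else ids

-- ===== PORT B =====
-- the inner 'for w in words: … break / else:' — scan the shared iterator for the next
-- in-vocab word; returns its id and the iterator's remaining state, or none if exhausted
def pvNextMatch (vocab_dict : List (String × Int)) : List String → Option (Int × List String)
  | [] => none
  | w :: ws => if pvHas vocab_dict w then some (pvGet vocab_dict w, ws) else pvNextMatch vocab_dict ws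

-- the outer 'while len(out) < max_docment_length' loop
def pvProduce (vocab_dict : List (String × Int)) (m : Int) (words : List String) (out : List Int) : List Int :=
  if (out.length : Int) < m then
    match pvNextMatch vocab_dict words with
    | some (v, rest) => pvProduce vocab_dict m rest (out ++ [v])
    | none => pvProduce vocab_dict m words (out ++ [pvGet vocab_dict "<UNK>"])
  else out
termination_by (m - out.length).toNat
decreasing_by all_goals (simp; omega)

def words2ids_alt (words_list : List String) (vocab_dict : List (String × Int)) (max_docment_length : Int) : List Int :=
  pvProduce vocab_dict max_docment_length words_list []

-- ===== PRECONDITION & SPEC =====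
-- Pre_ excludes exactly the inputs where Python A raises KeyError '<UNK>': padding is
-- needed (fewer in-vocab words than the cap) but '<UNK>' is not a key of the dict.
def Pre_words2ids (words_list : List String) (vocab_dict : List (String × Int)) (max_docment_length : Int) : Prop :=
  pvHas vocab_dict "<UNK>" = true ∨ max_docment_length ≤ (words_list.countP (fun w => pvHas vocab_dict w) : Int)
instance (words_list : List String) (vocab_dict : List (String × Int)) (max_docment_length : Int) : Decidable (Pre_words2ids words_list vocab_dict max_docment_length) := by unfold Pre_words2ids; infer_instance

def pvWitness_words2ids : List String × (List (String × Int)) × Int := (["a", "b", "x"], [("a", 1), ("b", 2), ("<UNK>", 9)], 5)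

def Spec_words2ids (words_list : List String) (vocab_dict : List (String × Int)) (max_docment_length : Int) (out : List Int) : Prop := out = words2ids_alt words_list vocab_dict max_docment_length
instance (words_list : List String) (vocab_dict : List (String × Int)) (max_docment_length : Int) (out : List Int) : Decidable (Spec_words2ids words_list vocab_dict max_docment_length out) := by unfold Spec_words2ids; infer_instance

-- ===== CLAIM (what is proved, stated in full; the proofs are below) =====
def Claim_equal_words2ids : Prop := ∀ (words_list : List String) (vocab_dict : List (String × Int)) (max_docment_length : Int), Dom_words2ids words_list vocab_dict max_docment_length → Pre_words2ids words_list vocab_dict max_docment_length → Spec_words2ids words_list vocab_dict max_docment_length (words2ids words_list vocab_dict max_docment_length)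

-- ===== LEMMAS AND PROOFS =====

-- the canonical shape both programs compute: first t in-vocab ids, padded to length t
def pvShape (vocab_dict : List (String × Int)) (ws : List String) (t : Nat) : List Int :=
  let g := ((ws.filter (fun w => pvHas vocab_dict w)).map (fun w => pvGet vocab_dict w)).take t
  g ++ List.replicate (t - g.length) (pvGet vocab_dict "<UNK>")

-- A's first loop equals "map over the in-vocab filter, truncated to the cap".
lemma loopA_eq (d : List (String × Int)) (m : Int) :
    ∀ (ws : List String) (ids : List Int),
      ws.foldl (fun ids item =>
          if pvHas d item && decide ((ids.length : Int) < m) then ids ++ [pvGet d item] else ids) ids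
      = ids ++ ((ws.filter (fun w => pvHas d w)).map (fun w => pvGet d w)).take (m.toNat - ids.length) := by
  intro ws
  induction ws with
  | nil => intro ids; simp
  | cons w ws ih =>
    intro ids
    by_cases hw : pvHas d w = true
    · by_cases hlt : (ids.length : Int) < m
      · have h1 : m.toNat - ids.length = (m.toNat - (ids.length + 1)) + 1 := by omega
        simp only [List.foldl_cons, hw, hlt, decide_true, Bool.and_self, if_pos,
          List.filter_cons_of_pos, List.map_cons, ih, h1, List.take_succ_cons]
        simp
      · have h0 : m.toNat - ids.length = 0 := by omega
        simp only [List.foldl_cons, hw, hlt, decide_false, Bool.and_false, ih,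
          List.filter_cons_of_pos, List.map_cons, h0, List.take_zero, List.append_nil]
        simp [h0]
    · rw [List.foldl_cons, if_neg (by simp [hw]), ih ids,
        List.filter_cons_of_neg (p := fun w => pvHas d w) (by simp [hw])]

-- the padding loop appends one copy of u per range element
lemma padA_eq (u : Int) : ∀ (l : List Int) (ids : List Int),
    l.foldl (fun acc _ => acc ++ [u]) ids = ids ++ List.replicate l.length u := by
  intro l
  induction l with
  | nil => intro ids; simp
  | cons x xs ih =>
    intro ids
    rw [List.foldl_cons, ih, List.append_assoc]
    rfl

-- A computes pvShape with t = the cap (clamped at 0)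
lemma wordsA_shape (ws : List String) (d : List (String × Int)) (m : Int) :
    words2ids ws d m = pvShape d ws m.toNat := by
  unfold words2ids pvShape
  rw [loopA_eq]
  simp only [List.nil_append, List.length_nil, Nat.sub_zero]
  set t := ((ws.filter (fun w => pvHas d w)).map (fun w => pvGet d w)).take m.toNat with ht
  have htle : t.length ≤ m.toNat := by rw [ht]; exact (List.length_take_le _ _)
  by_cases hlt : ((t.length : Int) < m)
  · rw [if_pos hlt, padA_eq, PySem.List.length_pyRange_one]
    congr 2
    omega
  · rw [if_neg hlt]
    have : m.toNat - t.length = 0 := by omega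
    rw [this]
    simp

-- successful scan step: the filtered-mapped ids of the iterator start with the found id
lemma nextMatch_some (d : List (String × Int)) :
    ∀ (ws : List String) (v : Int) (rest : List String),
      pvNextMatch d ws = some (v, rest) →
      (ws.filter (fun w => pvHas d w)).map (fun w => pvGet d w)
        = v :: (rest.filter (fun w => pvHas d w)).map (fun w => pvGet d w) := by
  intro ws
  induction ws with
  | nil => intro v rest h; simp [pvNextMatch] at h
  | cons w ws ih =>
    intro v rest h
    by_cases hw : pvHas d w = true
    · simp only [pvNextMatch, hw, if_pos] at h
      obtain ⟨hv, hr⟩ := Prod.mk.injEq .. ▸ Option.some.injEq .. ▸ h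
      rw [List.filter_cons_of_pos hw, List.map_cons]
      cases h
      rfl
    · simp only [pvNextMatch, if_neg hw] at h
      rw [List.filter_cons_of_neg (by simp [hw])]
      exact ih v rest h
  
-- exhausted scan: no in-vocab words remain
lemma nextMatch_none (d : List (String × Int)) :
    ∀ (ws : List String), pvNextMatch d ws = none →
      (ws.filter (fun w => pvHas d w)).map (fun w => pvGet d w) = [] := by
  intro ws
  induction ws with
  | nil => intro _; simp
  | cons w ws ih =>
    intro h
    by_cases hw : pvHas d w = true
    · simp [pvNextMatch, hw] at h
    · simp only [pvNextMatch, if_neg hw] at h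
      rw [List.filter_cons_of_neg (by simp [hw])]
      exact ih h

-- B's while loop computes pvShape of the remaining budget
lemma produce_shape (d : List (String × Int)) (m : Int) :
    ∀ (t : Nat) (ws : List String) (out : List Int), (m - out.length).toNat = t →
      pvProduce d m ws out = out ++ pvShape d ws t := by
  intro t
  induction t with
  | zero =>
    intro ws out h
    rw [pvProduce, if_neg (by omega), pvShape]
    simp
  | succ n ih =>
    intro ws out h
    have hlt : (out.length : Int) < m := by omega
    rw [pvProduce, if_pos hlt]
    cases hnm : pvNextMatch d ws with
    | some p =>
      obtain ⟨v, rest⟩ := p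
      show pvProduce d m rest (out ++ [v]) = out ++ pvShape d ws (n + 1)
      rw [ih rest (out ++ [v]) (by simp; omega), pvShape, pvShape,
        nextMatch_some d ws v rest hnm]
      simp [List.take_succ_cons]
    | none =>
      show pvProduce d m ws (out ++ [pvGet d "<UNK>"]) = out ++ pvShape d ws (n + 1)
      rw [ih ws (out ++ [pvGet d "<UNK>"]) (by simp; omega), pvShape, pvShape,
        nextMatch_none d ws hnm]
      simp [List.replicate_succ]

-- ===== VERDICT (by name: the statement is the Claim_ definition above) =====
theorem words2ids_spec : Claim_equal_words2ids := by
  intro ws d m _ _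
  unfold Spec_words2ids words2ids_alt
  rw [wordsA_shape, produce_shape d m m.toNat ws [] (by simp)]
  simp
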